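-- pv_equiv track=rewrite | github.com/teyhd/LLM_Context | 2. Train_model.py | iter_targets
-- ===== SOURCE A (Python) =====
-- from typing import Any, Dict, Iterable, List, Optional, Tuple
--
-- def iter_targets(messages: List[Dict[str, str]], mode: str) -> Iterable[Tuple[List[Dict[str, str]], str]]:
--     indices = [i for i, m in enumerate(messages) if m["role"] == "assistant"]
--     if not indices:
--         return []
--     if mode == "last":
--         indices = [indices[-1]]
--     for idx in indices:
--         ctx = messages[:idx]
--         ans = messages[idx]["content"].strip()
--         if ans:
--             yield ctx, ans
-- ===== SOURCE B (Python) =====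
-- def iter_targets(messages, mode):
--     # Single reverse pass: pop messages off a working copy so the remaining
--     # list IS the context (no index table, no slicing); results are collected
--     # back-to-front and reversed once at the end.  In "last" mode a flag
--     # blocks every assistant message after (i.e. before, in list order) the
--     # first one encountered from the end.
--     ctx = list(messages)
--     out = []
--     seen_assistant = False
--     while ctx:
--         m = ctx.pop()
--         if m["role"] == "assistant" and not (mode == "last" and seen_assistant):
--             seen_assistant = True
--             ans = m["content"].strip()
--             if ans:
--                 out.append((list(ctx), ans))
--     out.reverse()
--     return out
-- ===== Notes on version B (the rewrite author's own statement) =====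
-- stated objective: alternative
-- what changed: Replaces the index table plus per-index slicing with one destructive reverse traversal: messages are popped off a working copy so the remaining list is itself the context, a seen-flag realises the 'last' mode inside the same loop, and the output is built back-to-front and reversed once.
import Mathlib
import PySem

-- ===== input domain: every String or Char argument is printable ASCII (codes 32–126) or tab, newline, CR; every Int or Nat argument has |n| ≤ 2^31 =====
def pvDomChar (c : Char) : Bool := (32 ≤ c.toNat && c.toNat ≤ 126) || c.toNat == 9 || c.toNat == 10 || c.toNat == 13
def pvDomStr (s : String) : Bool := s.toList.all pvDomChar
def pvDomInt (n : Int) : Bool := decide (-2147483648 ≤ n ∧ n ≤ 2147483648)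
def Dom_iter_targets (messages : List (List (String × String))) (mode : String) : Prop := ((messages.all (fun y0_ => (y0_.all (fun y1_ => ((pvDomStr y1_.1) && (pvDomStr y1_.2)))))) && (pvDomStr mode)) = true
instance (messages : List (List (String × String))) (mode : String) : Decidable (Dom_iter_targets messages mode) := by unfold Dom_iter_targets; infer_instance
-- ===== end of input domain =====

-- B replaces A's index table + slicing with one destructive reverse pop-loop whose
-- remaining list is itself the context, building the output back-to-front; both are
-- generators/lists of the same yielded pairs (no argument is mutated by either).

-- ===== PORT A =====
-- literal transliteration of A: build `indices`, test emptiness, shrink to the last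
-- index for mode == "last", then loop over the indices slicing and stripping.
def iter_targets (messages : List (List (String × String))) (mode : String) : List ((List (List (String × String))) × String) :=
  let indices : List Int :=
    (PySem.List.enumerate messages).foldl
      (fun acc im => if ((im.2.lookup "role").getD "") == "assistant" then acc ++ [im.1] else acc) []
  if indices.isEmpty then []
  else
    let indices := if mode == "last" then [indices.getLast!] else indices
    indices.foldl
      (fun acc idx =>
        let ctx := PySem.List.slice messages none (some idx)
        let ans := PySem.Str.strip (((PySem.List.pyGetD messages idx []).lookup "content").getD "")
        if ans ≠ "" then acc ++ [(ctx, ans)] else acc) []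

-- ===== PORT B =====
-- literal transliteration of B's while-loop: `ctx.pop()` is getLast?/dropLast, the
-- `out.append` is `out ++ [_]`, and the final `out.reverse()` is `.reverse`.
def altLoop (mode : String) (ctx : List (List (String × String))) (seen : Bool)
    (out : List ((List (List (String × String))) × String)) :
    List ((List (List (String × String))) × String) :=
  match h : ctx.getLast? with
  | none => out
  | some m =>
    let ctx' := ctx.dropLast
    if (((m.lookup "role").getD "" == "assistant") && !(mode == "last" && seen)) then
      let ans := PySem.Str.strip ((m.lookup "content").getD "")
      if ans ≠ "" then altLoop mode ctx' true (out ++ [(ctx', ans)])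
      else altLoop mode ctx' true out
    else altLoop mode ctx' seen out
termination_by ctx.length
decreasing_by
  all_goals
    have hne : ctx ≠ [] := by
      intro hc; subst hc; simp at h
    simp [List.length_dropLast]
    exact List.length_pos_iff.mpr hne

def iter_targets_alt (messages : List (List (String × String))) (mode : String) : List ((List (List (String × String))) × String) :=
  (altLoop mode messages false []).reverse

-- ===== PRECONDITION & SPEC =====
-- Pre_ excludes exactly the inputs where the Python A raises KeyError: a message without a
-- "role" key, or a missing "content" key on an assistant message whose content A actually
-- reads (all assistants for mode ≠ "last", only the last assistant for mode == "last").
def Pre_iter_targets (messages : List (List (String × String))) (mode : String) : Prop :=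
  (∀ m ∈ messages, (m.lookup "role").isSome) ∧
  (∀ m ∈ (if mode == "last"
            then (messages.filter (fun m => ((m.lookup "role").getD "") == "assistant")).reverse.take 1
            else messages.filter (fun m => ((m.lookup "role").getD "") == "assistant")),
      (m.lookup "content").isSome)
instance (messages : List (List (String × String))) (mode : String) : Decidable (Pre_iter_targets messages mode) := by unfold Pre_iter_targets; infer_instance

def pvWitness_iter_targets : (List (List (String × String))) × String :=
  ([[("role", "user"), ("content", "q")], [("role", "assistant"), ("content", " hi ")]], "last")

def Spec_iter_targets (messages : List (List (String × String))) (mode : String) (out : List ((List (List (String × String))) × String)) : Prop := out = iter_targets_alt messages mode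
instance (messages : List (List (String × String))) (mode : String) (out : List ((List (List (String × String))) × String)) : Decidable (Spec_iter_targets messages mode out) := by unfold Spec_iter_targets; infer_instance

-- ===== CLAIM (what is proved, stated in full; the proofs are below) =====
def Claim_equal_iter_targets : Prop := ∀ (messages : List (List (String × String))) (mode : String), Dom_iter_targets messages mode → Pre_iter_targets messages mode → Spec_iter_targets messages mode (iter_targets messages mode)

-- ===== LEMMAS AND PROOFS =====

-- shared abbreviations for the proofs only
def roleIs (m : List (String × String)) : Bool := (m.lookup "role").getD "" == "assistant"
def ansOf (m : List (String × String)) : String := PySem.Str.strip ((m.lookup "content").getD "")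

-- ascending-order characterisation used for mode ≠ "last"
def specS (messages : List (List (String × String))) : List ((List (List (String × String))) × String) :=
  (List.range messages.length).filter
      (fun k => roleIs (messages.getD k []) && ansOf (messages.getD k []) ≠ "")
    |>.map (fun k => (messages.take k, ansOf (messages.getD k [])))

-- last-assistant characterisation used for mode == "last"
def specT (messages : List (List (String × String))) : Option ((List (List (String × String))) × String) :=
  ((List.range messages.length).filter (fun k => roleIs (messages.getD k []))
    |>.map (fun k => (messages.take k, ((messages.getD k []).lookup "content").getD ""))).getLast?

def payload (o : Option ((List (List (String × String))) × String)) : List ((List (List (String × String))) × String) :=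
  match o with
  | none => []
  | some (c, raw) => if PySem.Str.strip raw ≠ "" then [(c, PySem.Str.strip raw)] else []

theorem altLoop_nil (mode : String) (seen : Bool) (out : List ((List (List (String × String))) × String)) :
    altLoop mode [] seen out = out := by
  rw [altLoop]
  split
  · rfl
  · simp_all

theorem altLoop_concat (mode : String) (ys : List (List (String × String))) (m : List (String × String)) (seen : Bool) (out : List ((List (List (String × String))) × String)) :
    altLoop mode (ys ++ [m]) seen out =
      (if (((m.lookup "role").getD "" == "assistant") && !(mode == "last" && seen)) then
        (let ans := PySem.Str.strip ((m.lookup "content").getD "")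
         if ans ≠ "" then altLoop mode ys true (out ++ [(ys, ans)])
         else altLoop mode ys true out)
      else altLoop mode ys seen out) := by
  rw [altLoop]
  split
  · simp_all
  · rename_i m' hm'
    rw [List.getLast?_concat] at hm'
    cases hm'
    simp

theorem specS_concat (ys : List (List (String × String))) (m : List (String × String)) :
    specS (ys ++ [m]) = specS ys ++ (if roleIs m && ansOf m ≠ "" then [(ys, ansOf m)] else []) := by
  unfold specS
  rw [List.length_append, List.length_cons, List.length_nil, Nat.zero_add, List.range_succ,
    List.filter_append, List.map_append]
  have hk : ∀ k ∈ List.range ys.length, (ys ++ [m]).getD k [] = ys.getD k [] ∧ (ys ++ [m]).take k = ys.take k := by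
    intro k hk
    have hklt : k < ys.length := List.mem_range.mp hk
    constructor
    · simp [List.getD, List.getElem?_append_left hklt]
    · rw [List.take_append_of_le_length (Nat.le_of_lt hklt)]
  congr 1
  · rw [List.filter_congr (fun k hk' => by rw [(hk k hk').1]),
      List.map_congr_left (fun k hk' => by rw [(hk k (List.mem_filter.mp hk').1).1, (hk k (List.mem_filter.mp hk').1).2])]
  · have hgd : (ys ++ [m]).getD ys.length [] = m := by
      simp [List.getD]
    have ht : (ys ++ [m]).take ys.length = ys := by
      simp
    have hgd' : (ys ++ [m])[ys.length]? = some m := by simp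
    by_cases hr : roleIs m = true
    · by_cases ha : ansOf m = ""
      · simp [List.getD, hr, ha]
      · simp [List.getD, ht, hr, ha]
    · simp [List.getD, hr]

theorem specT_concat (ys : List (List (String × String))) (m : List (String × String)) :
    specT (ys ++ [m]) = (if roleIs m then some (ys, (m.lookup "content").getD "") else (specT ys)) := by
  unfold specT
  rw [List.length_append, List.length_cons, List.length_nil, Nat.zero_add, List.range_succ,
    List.filter_append, List.map_append, List.getLast?_append]
  have hk : ∀ k ∈ List.range ys.length, (ys ++ [m]).getD k [] = ys.getD k [] ∧ (ys ++ [m]).take k = ys.take k := by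
    intro k hk
    have hklt : k < ys.length := List.mem_range.mp hk
    constructor
    · simp [List.getD, List.getElem?_append_left hklt]
    · rw [List.take_append_of_le_length (Nat.le_of_lt hklt)]
  have hmain : (List.map (fun k => ((ys ++ [m]).take k, (((ys ++ [m]).getD k []).lookup "content").getD ""))
      (List.filter (fun k => roleIs ((ys ++ [m]).getD k [])) (List.range ys.length)))
      = (List.map (fun k => (ys.take k, ((ys.getD k []).lookup "content").getD ""))
      (List.filter (fun k => roleIs (ys.getD k [])) (List.range ys.length))) := by
    rw [List.filter_congr (fun k hk' => by rw [(hk k hk').1]),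
      List.map_congr_left (fun k hk' => by rw [(hk k (List.mem_filter.mp hk').1).1, (hk k (List.mem_filter.mp hk').1).2])]
  have hgd : (ys ++ [m]).getD ys.length [] = m := by simp [List.getD]
  have ht : (ys ++ [m]).take ys.length = ys := by simp
  rw [hmain]
  have hgd' : (ys ++ [m])[ys.length]? = some m := by simp
  by_cases hc : roleIs m = true
  · simp [List.getD, ht, hc]
  · simp [List.getD, hc]

-- B, mode ≠ "last": the loop produces specS in reverse on top of `out`
theorem altLoop_nonlast (mode : String) (hm : (mode == "last") = false) :
    ∀ (ctx : List (List (String × String))) (seen : Bool) (out : List ((List (List (String × String))) × String)),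
      altLoop mode ctx seen out = out ++ (specS ctx).reverse := by
  intro ctx
  induction ctx using List.reverseRecOn with
  | nil => intro seen out; rw [altLoop_nil]; simp [specS]
  | append_singleton ys m ih =>
    intro seen out
    rw [altLoop_concat, specS_concat, hm]
    by_cases hr : ((m.lookup "role").getD "" == "assistant") = true <;>
      by_cases ha : PySem.Str.strip ((m.lookup "content").getD "") = "" <;>
      simp [roleIs, ansOf, hr, ha, ih]

-- B, mode == "last", flag already set: nothing more is appended
theorem altLoop_last_seen (mode : String) (hm : (mode == "last") = true) :
    ∀ (ctx : List (List (String × String))) (out : List ((List (List (String × String))) × String)),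
      altLoop mode ctx true out = out := by
  intro ctx
  induction ctx using List.reverseRecOn with
  | nil => intro out; rw [altLoop_nil]
  | append_singleton ys m ih =>
    intro out
    rw [altLoop_concat, hm]
    simp [ih]

-- B, mode == "last": the loop produces the payload of the last assistant
theorem altLoop_last (mode : String) (hm : (mode == "last") = true) :
    ∀ (ctx : List (List (String × String))) (out : List ((List (List (String × String))) × String)),
      altLoop mode ctx false out = out ++ payload (specT ctx) := by
  intro ctx
  induction ctx using List.reverseRecOn with
  | nil => intro out; rw [altLoop_nil]; simp [specT, payload]
  | append_singleton ys m ih =>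
    intro out
    rw [altLoop_concat, specT_concat, hm]
    by_cases hr : ((m.lookup "role").getD "" == "assistant") = true <;>
      by_cases ha : PySem.Str.strip ((m.lookup "content").getD "") = "" <;>
      simp [roleIs, hr, ha, ih, altLoop_last_seen mode hm, payload]

-- A with mode ≠ "last" computes specS
theorem iter_targets_nonlast (messages : List (List (String × String))) (mode : String)
    (hm : (mode == "last") = false) : iter_targets messages mode = specS messages := by
  unfold iter_targets
  rw [PySem.List.enumerate_eq_map_pyRange messages []]
  rw [PySem.List.foldl_append_if]
  simp only [List.nil_append, hm, Bool.false_eq_true, if_false]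
  have hlen : PySem.List.len messages = (messages.length : Int) := rfl
  rw [hlen, PySem.List.pyRange_zero_natCast]
  rw [List.filter_map, List.filter_map, List.map_map, List.map_map]
  simp only [Function.comp_def, PySem.List.pyGetD_natCast]
  set F := List.filter (fun k => (List.lookup "role" (messages.getD k [])).getD "" == "assistant") (List.range messages.length) with hFdef
  have h2 : ∀ k : Nat, PySem.List.slice messages none (some (k : Int)) = messages.take k := by
    intro k; rw [PySem.List.slice_to messages (Int.natCast_nonneg k)]; simp
  by_cases hF : F = []
  · rw [if_pos (by simp [hF])]
    unfold specS
    have hfil : List.filter (fun k => roleIs (messages.getD k []) && ansOf (messages.getD k []) ≠ "") (List.range messages.length) = [] := by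
      rw [List.filter_eq_nil_iff]
      intro k hk
      have : k ∉ F := by rw [hF]; simp
      rw [hFdef] at this
      simp only [List.mem_filter, hk, true_and] at this
      intro hcon
      rw [Bool.and_eq_true] at hcon
      exact absurd (by simpa [roleIs] using hcon.1) this
    rw [hfil]
    simp
  · rw [if_neg (by simp [List.isEmpty_iff, hF])]
    rw [List.foldl_map]
    simp only [PySem.List.pyGetD_natCast, h2]
    have hcong : (fun (x : List ((List (List (String × String))) × String)) (y : Nat) =>
        if PySem.Str.strip ((List.lookup "content" (messages.getD y [])).getD "") ≠ "" then
          x ++ [(List.take y messages, PySem.Str.strip ((List.lookup "content" (messages.getD y [])).getD ""))]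
        else x)
        = (fun x y =>
        if (!decide (PySem.Str.strip ((List.lookup "content" (messages.getD y [])).getD "") = "")) = true then
          x ++ [(List.take y messages, PySem.Str.strip ((List.lookup "content" (messages.getD y [])).getD ""))]
        else x) := by
      funext x y
      by_cases hy : PySem.Str.strip ((List.lookup "content" (messages.getD y [])).getD "") = "" <;> simp [hy]
    rw [hcong, PySem.List.foldl_append_if, List.nil_append]
    unfold specS
    rw [hFdef, List.filter_filter]
    apply congrArg₂
    · funext k
      simp [ansOf, List.getD]
    · apply List.filter_congr
      intro k _
      simp only [roleIs, ansOf, List.getD, ne_eq, decide_not]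
      exact Bool.and_comm _ _

-- A with mode == "last" computes the payload of specT
theorem iter_targets_last (messages : List (List (String × String))) (mode : String)
    (hm : (mode == "last") = true) : iter_targets messages mode = payload (specT messages) := by
  unfold iter_targets
  rw [PySem.List.enumerate_eq_map_pyRange messages []]
  rw [PySem.List.foldl_append_if]
  simp only [List.nil_append, hm, if_true]
  have hlen : PySem.List.len messages = (messages.length : Int) := rfl
  rw [hlen, PySem.List.pyRange_zero_natCast]
  rw [List.filter_map, List.filter_map, List.map_map, List.map_map]
  simp only [Function.comp_def, PySem.List.pyGetD_natCast]
  set F := List.filter (fun k => (List.lookup "role" (messages.getD k [])).getD "" == "assistant") (List.range messages.length) with hFdef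
  have hFT : specT messages = (F.map (fun k => (messages.take k, ((messages.getD k []).lookup "content").getD ""))).getLast? := by
    unfold specT
    rw [hFdef]
    rfl
  by_cases hF : F = []
  · rw [if_pos (by simp [hF])]
    rw [hFT, hF]
    simp [payload]
  · rw [if_neg (by simp [hF])]
    obtain ⟨y, hy⟩ : ∃ y, F.getLast? = some y := by
      cases hlf : F.getLast? with
      | none => exact absurd (List.getLast?_eq_none_iff.mp hlf) hF
      | some a => exact ⟨a, rfl⟩
    obtain ⟨l', hFeq⟩ := List.getLast?_eq_some_iff.mp hy
    have hlast : (List.map (fun (k : Nat) => (k : Int)) F).getLast! = (y : Int) := by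
      rw [hFeq, List.map_append, List.map_singleton, List.getLast!_eq_getLast?_getD, List.getLast?_concat]
      rfl
    have hTlast : (F.map (fun k => (messages.take k, ((messages.getD k []).lookup "content").getD ""))).getLast? = some (messages.take y, ((messages.getD y []).lookup "content").getD "") := by
      rw [hFeq, List.map_append, List.map_singleton, List.getLast?_concat]
    rw [hlast, hFT, hTlast]
    simp only [List.foldl_cons, List.foldl_nil, payload]
    have h1 : PySem.List.pyGetD messages (↑y) [] = messages.getD y [] := PySem.List.pyGetD_natCast messages y []
    have h2 : PySem.List.slice messages none (some (y : Int)) = messages.take y := by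
      rw [PySem.List.slice_to messages (Int.natCast_nonneg y)]; simp
    rw [h1, h2]
    by_cases ha : PySem.Str.strip ((List.lookup "content" (messages.getD y [])).getD "") = "" <;> simp [ha]

-- main equality
theorem iter_targets_eq_alt (messages : List (List (String × String))) (mode : String) :
    iter_targets messages mode = iter_targets_alt messages mode := by
  unfold iter_targets_alt
  by_cases hm : (mode == "last") = true
  · rw [iter_targets_last messages mode hm, altLoop_last mode hm]
    simp only [List.nil_append]
    unfold payload
    cases specT messages with
    | none => simp
    | some p =>
      obtain ⟨c, raw⟩ := p
      by_cases ha : (PySem.Str.strip raw ≠ "")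
      · simp [ha]
      · simp [ha]
  · rw [iter_targets_nonlast messages mode (by simpa using hm),
      altLoop_nonlast mode (by simpa using hm)]
    simp

-- ===== VERDICT =====
theorem iter_targets_spec : Claim_equal_iter_targets := by
  intro messages mode _ _
  exact iter_targets_eq_alt messages mode
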